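-- pv_equiv track=rewrite | github.com/KalebAsratemedhin/competitive-programming | 05-Aug-2024/Minimum Size Subarray in Infinite Array 187713.py | minSizeSubarray
-- ===== SOURCE A (Python) =====
-- from typing import List
--
-- def minSizeSubarray(nums: List[int], target: int) -> int:
--
--     sum_ = sum(nums)
--
--     def findMinSubarray(total, nums):
--         temp = nums + nums
--         prefix = {0: -1}
--         length = float("inf")
--         num = 0
--         for i in range(len(temp)):
--             num += temp[i]
--             if num - total in prefix:
--                 length = min(length, i - prefix[num - total])
--             prefix[num] = i
--         return length if length != float("inf") else -1
--     if sum_ == target: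
--         return len(nums)
--     elif target < sum_:
--         return findMinSubarray(target, nums)
--     else:
--         ans = target // sum_
--         target %= sum_
--         if not target:
--             return ans * len(nums)
--         temp = findMinSubarray(target, nums)
--
--         return temp + ans * len(nums) if temp != -1 else -1
-- ===== SOURCE B (Python) =====
-- from typing import List
--
-- def _shortest(total, nums):
--     temp = nums + nums
--     best = -1
--     for i in range(len(temp)):
--         s = 0
--         for j in range(i, len(temp)):
--             s += temp[j]
--             if s == total and (best == -1 or j - i + 1 < best):
--                 best = j - i + 1
--     return best
--
-- def minSizeSubarray(nums: List[int], target: int) -> int: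
--     sum_ = sum(nums)
--     if sum_ == target:
--         return len(nums)
--     if target < sum_:
--         return _shortest(target, nums)
--     ans = target // sum_
--     target %= sum_
--     if target == 0:
--         return ans * len(nums)
--     temp = _shortest(target, nums)
--     return temp + ans * len(nums) if temp != -1 else -1
-- ===== Notes on version B (the rewrite author's own statement) =====
-- stated objective: alternative
-- what changed: The inner shortest-subarray search over the doubled array is rewritten from a one-pass prefix-sum hash map (latest prefix index per sum) into a plain two-nested-loop scan over all start/end pairs keeping the minimum length, with a -1 sentinel instead of float('inf'); the outer case analysis is kept.
import Mathlib
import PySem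

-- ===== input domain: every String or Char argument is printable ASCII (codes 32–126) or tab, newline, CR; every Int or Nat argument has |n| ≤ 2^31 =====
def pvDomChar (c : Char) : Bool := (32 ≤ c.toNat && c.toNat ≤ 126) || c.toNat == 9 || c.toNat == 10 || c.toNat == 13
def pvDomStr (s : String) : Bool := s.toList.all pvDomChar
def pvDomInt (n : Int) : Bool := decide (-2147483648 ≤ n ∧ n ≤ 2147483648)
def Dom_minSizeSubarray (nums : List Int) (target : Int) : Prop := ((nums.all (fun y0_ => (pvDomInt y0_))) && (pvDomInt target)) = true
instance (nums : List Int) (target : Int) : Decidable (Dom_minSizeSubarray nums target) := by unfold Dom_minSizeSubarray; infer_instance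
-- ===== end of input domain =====

-- B replaces A's prefix-sum hash-map inner search by a plain nested-loop scan over all
-- start/end pairs of the doubled array (same outer case analysis); alternative, not faster.


-- ===== PORT A =====
-- one iteration of A's prefix-dict loop: state = (prefix dict, length (none = inf), num)
def stepA (temp : List Int) (total : Int)
    (st : PySem.Dict Int Int × Option Int × Int) (i : Int) :
    PySem.Dict Int Int × Option Int × Int :=
  let num := st.2.2 + PySem.List.pyGetD temp i 0
  let length :=
    match st.1.get? (num - total) with
    | some p => some (match st.2.1 with
                      | none => i - p          -- min(inf, x) = x
                      | some l => min l (i - p))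
    | none => st.2.1
  (st.1.insert num i, length, num)

-- 'return length if length != float("inf") else -1'
def finishA (length : Option Int) : Int :=
  match length with
  | none => -1
  | some l => l

def findMinSubarrayA (total : Int) (nums : List Int) : Int :=
  let temp := nums ++ nums
  let st := (PySem.List.pyRange 0 (PySem.List.len temp) 1).foldl (stepA temp total)
      (PySem.Dict.empty.insert 0 (-1), none, 0)
  finishA st.2.1

def minSizeSubarray (nums : List Int) (target : Int) : Int :=
  let sum_ := nums.sum
  if sum_ = target then PySem.List.len nums
  else if target < sum_ then findMinSubarrayA target nums
  else
    let ans := PySem.Int.floordiv target sum_   -- sum_ ≠ 0 by Pre_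
    let target' := PySem.Int.mod target sum_
    if target' = 0 then ans * PySem.List.len nums
    else
      let temp := findMinSubarrayA target' nums
      if temp ≠ -1 then temp + ans * PySem.List.len nums else -1

-- ===== PORT B =====
-- one iteration of B's inner loop for start i: state = (best, running sum s)
def stepBIn (temp : List Int) (total : Int) (i : Int) (p : Int × Int) (j : Int) :
    Int × Int :=
  let s := p.2 + PySem.List.pyGetD temp j 0
  let best := if s = total ∧ (p.1 = -1 ∨ j - i + 1 < p.1) then j - i + 1 else p.1
  (best, s)

def shortestB (total : Int) (nums : List Int) : Int :=
  let temp := nums ++ nums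
  (PySem.List.pyRange 0 (PySem.List.len temp) 1).foldl
    (fun best i =>
      ((PySem.List.pyRange i (PySem.List.len temp) 1).foldl
        (stepBIn temp total i) (best, 0)).1)
    (-1)

def minSizeSubarray_alt (nums : List Int) (target : Int) : Int :=
  let sum_ := nums.sum
  if sum_ = target then PySem.List.len nums
  else if target < sum_ then shortestB target nums
  else
    let ans := PySem.Int.floordiv target sum_
    let target' := PySem.Int.mod target sum_
    if target' = 0 then ans * PySem.List.len nums
    else
      let temp := shortestB target' nums
      if temp ≠ -1 then temp + ans * PySem.List.len nums else -1

-- ===== PRECONDITION & SPEC =====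
-- Pre_ excludes exactly the inputs where A (and B) raise ZeroDivisionError:
-- sum(nums) = 0 with target > sum(nums) reaches 'target // sum_'.
def Pre_minSizeSubarray (nums : List Int) (target : Int) : Prop :=
  ¬ (nums.sum = 0 ∧ 0 < target)
instance (nums : List Int) (target : Int) : Decidable (Pre_minSizeSubarray nums target) := by
  unfold Pre_minSizeSubarray; infer_instance

def pvWitness_minSizeSubarray : List Int × Int := ([1, 2, 1], 3)

def Spec_minSizeSubarray (nums : List Int) (target : Int) (out : Int) : Prop := out = minSizeSubarray_alt nums target
instance (nums : List Int) (target : Int) (out : Int) : Decidable (Spec_minSizeSubarray nums target out) := by unfold Spec_minSizeSubarray; infer_instance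

-- ===== CLAIM (what is proved, stated in full; the proofs are below) =====
def Claim_equal_minSizeSubarray : Prop := ∀ (nums : List Int) (target : Int), Dom_minSizeSubarray nums target → Pre_minSizeSubarray nums target → Spec_minSizeSubarray nums target (minSizeSubarray nums target)

-- ===== LEMMAS AND PROOFS =====

-- prefix sums of temp
def pfx (temp : List Int) (k : Nat) : Int := (temp.take k).sum

-- (k, j) delimits a contiguous subarray temp[k..j] summing to total
def ValidP (temp : List Int) (total : Int) (k j : Nat) : Prop :=
  k ≤ j ∧ j < temp.length ∧ pfx temp (j+1) - pfx temp k = total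

-- largest k ≤ m with pfx temp k = v (what A's dict stores, shifted by -1)
def maxPre (temp : List Int) : Nat → Int → Option Nat
  | 0, v => if pfx temp 0 = v then some 0 else none
  | m+1, v => if pfx temp (m+1) = v then some (m+1) else maxPre temp m v

-- b is the minimum of (j - k + 1) over pairs satisfying Q, with -1 meaning "no pair"
def MinOf (Q : Nat → Nat → Prop) (b : Int) : Prop :=
  (b = -1 ∧ ∀ k j, ¬ Q k j) ∨
  ((∃ k j, Q k j ∧ b = (j : Int) - (k : Int) + 1) ∧
   ∀ k j, Q k j → b ≤ (j : Int) - (k : Int) + 1)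

-- A's optional length: none = inf, some l carries the same minimum
def AInv (Q : Nat → Nat → Prop) (o : Option Int) : Prop :=
  MinOf Q (o.getD (-1)) ∧ (o = none ↔ ∀ k j, ¬ Q k j)

lemma finishA_eq (o : Option Int) : finishA o = o.getD (-1) := by
  cases o <;> rfl

lemma pfx_succ (temp : List Int) {m : Nat} (h : m < temp.length) :
    pfx temp (m+1) = pfx temp m + temp.getD m 0 := by
  unfold pfx
  rw [List.take_add_one, List.getElem?_eq_getElem h, List.sum_append,
      List.getD_eq_getElem?_getD, List.getElem?_eq_getElem h]
  simp

lemma maxPre_some (temp : List Int) {m : Nat} {v : Int} {k : Nat}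
    (h : maxPre temp m v = some k) : k ≤ m ∧ pfx temp k = v := by
  induction m with
  | zero =>
    unfold maxPre at h
    split at h
    · simp_all
    · simp_all
  | succ n ih =>
    unfold maxPre at h
    split at h
    · rename_i hp
      cases h
      exact ⟨le_refl _, hp⟩
    · rcases ih h with ⟨h1, h2⟩
      exact ⟨Nat.le_succ_of_le h1, h2⟩

lemma maxPre_max (temp : List Int) {m : Nat} {v : Int} {k : Nat}
    (h : maxPre temp m v = some k) :
    ∀ k', k' ≤ m → pfx temp k' = v → k' ≤ k := by
  induction m with
  | zero =>
    intro k' hk' _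
    omega
  | succ n ih =>
    intro k' hk' hp
    unfold maxPre at h
    split at h
    · cases h; exact hk'
    · rename_i hne
      rcases Nat.lt_succ_iff_lt_or_eq.mp (Nat.lt_succ_of_le hk') with h' | rfl
      · exact ih h k' (by omega) hp
      · exact absurd hp hne

lemma maxPre_none (temp : List Int) {m : Nat} {v : Int}
    (h : maxPre temp m v = none) : ∀ k, k ≤ m → pfx temp k ≠ v := by
  induction m with
  | zero =>
    intro k hk
    unfold maxPre at h
    split at h
    · exact absurd h (by simp)
    · rename_i hne
      have : k = 0 := by omega
      subst this
      exact hne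
  | succ n ih =>
    intro k hk
    unfold maxPre at h
    split at h
    · exact absurd h (by simp)
    · rename_i hne
      rcases Nat.lt_succ_iff_lt_or_eq.mp (Nat.lt_succ_of_le hk) with h' | rfl
      · exact ih h k (by omega)
      · exact hne

lemma MinOf_congr {Q Q' : Nat → Nat → Prop} {b : Int}
    (h : ∀ k j, Q k j ↔ Q' k j) (hb : MinOf Q b) : MinOf Q' b := by
  rcases hb with ⟨hb1, hb2⟩ | ⟨⟨k, j, hq, hv⟩, hmin⟩
  · exact Or.inl ⟨hb1, fun k j hq => hb2 k j ((h k j).mpr hq)⟩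
  · exact Or.inr ⟨⟨k, j, (h k j).mp hq, hv⟩, fun k j hq => hmin k j ((h k j).mpr hq)⟩

lemma MinOf_uniq {Q : Nat → Nat → Prop} {b b' : Int}
    (h1 : MinOf Q b) (h2 : MinOf Q b') : b = b' := by
  rcases h1 with ⟨rfl, h1n⟩ | ⟨⟨k, j, hq, hv⟩, h1m⟩ <;>
    rcases h2 with ⟨rfl, h2n⟩ | ⟨⟨k', j', hq', hv'⟩, h2m⟩
  · rfl
  · exact absurd hq' (h1n k' j')
  · exact absurd hq (h2n k j)
  · have l1 := h1m k' j' hq'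
    have l2 := h2m k j hq
    omega

lemma MinOf_add {Q : Nat → Nat → Prop} {b : Int} (k0 j0 : Nat)
    (hQ : ∀ k j, Q k j → k ≤ j) (hk : k0 ≤ j0) (hb : MinOf Q b) :
    MinOf (fun k j => Q k j ∨ (k = k0 ∧ j = j0))
      (if b = -1 ∨ (j0 : Int) - (k0 : Int) + 1 < b then (j0 : Int) - (k0 : Int) + 1 else b) := by
  rcases hb with ⟨rfl, hnone⟩ | ⟨⟨k, j, hq, hv⟩, hmin⟩
  · rw [if_pos (Or.inl rfl)]
    refine Or.inr ⟨⟨k0, j0, Or.inr ⟨rfl, rfl⟩, rfl⟩, ?_⟩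
    rintro k j (hq | ⟨rfl, rfl⟩)
    · exact absurd hq (hnone k j)
    · omega
  · have hkj := hQ k j hq
    have hb1 : (1 : Int) ≤ b := by omega
    by_cases hlt : (j0 : Int) - (k0 : Int) + 1 < b
    · rw [if_pos (Or.inr hlt)]
      refine Or.inr ⟨⟨k0, j0, Or.inr ⟨rfl, rfl⟩, rfl⟩, ?_⟩
      rintro k' j' (hq' | ⟨rfl, rfl⟩)
      · have := hmin k' j' hq'
        omega
      · omega
    · rw [if_neg (by omega)]
      refine Or.inr ⟨⟨k, j, Or.inl hq, hv⟩, ?_⟩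
      rintro k' j' (hq' | ⟨rfl, rfl⟩)
      · exact hmin k' j' hq'
      · omega

lemma AInv_congr {Q Q' : Nat → Nat → Prop} {o : Option Int}
    (h : ∀ k j, Q k j ↔ Q' k j) (hb : AInv Q o) : AInv Q' o :=
  ⟨MinOf_congr h hb.1,
   hb.2.trans (forall_congr' fun k => forall_congr' fun j => not_congr (h k j))⟩

lemma AInv_extend {Q : Nat → Nat → Prop} {o : Option Int}
    {R : Nat → Prop} {j0 kmax : Nat}
    (hmem : R kmax) (hmax : ∀ k, R k → k ≤ kmax) (hle : ∀ k, R k → k ≤ j0)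
    (hb : AInv Q o) :
    AInv (fun k j => Q k j ∨ (R k ∧ j = j0))
      (some (match o with
             | none => (j0 : Int) - (kmax : Int) + 1
             | some l => min l ((j0 : Int) - (kmax : Int) + 1))) := by
  obtain ⟨hmo, hiff⟩ := hb
  have hkmax := hmax kmax hmem
  have hkj0 := hle kmax hmem
  cases o with
  | none =>
    have hQe := hiff.mp rfl
    constructor
    · refine Or.inr ⟨⟨kmax, j0, Or.inr ⟨hmem, rfl⟩, rfl⟩, ?_⟩
      rintro k j (hq | ⟨hr, rfl⟩)
      · exact absurd hq (hQe k j)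
      · have := hmax k hr
        simp only [Option.getD_some]
        omega
    · exact iff_of_false (by simp) (fun hall => hall kmax j0 (Or.inr ⟨hmem, rfl⟩))
  | some l =>
    have hQne : ¬ (∀ k j, ¬ Q k j) := fun hall => by
      have := hiff.mpr hall
      simp at this
    rcases hmo with ⟨_, hall⟩ | ⟨⟨k1, j1, hq1, hl⟩, hminl⟩
    · exact absurd hall hQne
    · simp only [Option.getD_some] at hl hminl
      constructor
      · simp only [Option.getD_some]
        by_cases hc : l ≤ (j0 : Int) - (kmax : Int) + 1
        · rw [min_eq_left hc]
          refine Or.inr ⟨⟨k1, j1, Or.inl hq1, hl⟩, ?_⟩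
          rintro k j (hq | ⟨hr, rfl⟩)
          · exact hminl k j hq
          · have := hmax k hr
            omega
        · rw [min_eq_right (by omega)]
          refine Or.inr ⟨⟨kmax, j0, Or.inr ⟨hmem, rfl⟩, rfl⟩, ?_⟩
          rintro k j (hq | ⟨hr, rfl⟩)
          · have := hminl k j hq
            omega
          · have := hmax k hr
            omega
      · exact iff_of_false (by simp) (fun hall => hall kmax j0 (Or.inr ⟨hmem, rfl⟩))

lemma A_loop (temp : List Int) (total : Int) :
    ∀ m, m ≤ temp.length →
    (((List.range m).foldl (fun st (k : Nat) => stepA temp total st (k : Int))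
        (PySem.Dict.empty.insert 0 (-1), none, 0)).2.2 = pfx temp m) ∧
    (∀ v, ((List.range m).foldl (fun st (k : Nat) => stepA temp total st (k : Int))
        (PySem.Dict.empty.insert 0 (-1), none, 0)).1.get? v
          = (maxPre temp m v).map (fun (k : Nat) => (k : Int) - 1)) ∧
    AInv (fun k j => ValidP temp total k j ∧ j < m)
      (((List.range m).foldl (fun st (k : Nat) => stepA temp total st (k : Int))
        (PySem.Dict.empty.insert 0 (-1), none, 0)).2.1) := by
  intro m
  induction m with
  | zero =>
    intro _
    refine ⟨by simp [pfx], ?_, ?_⟩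
    · intro v
      simp only [List.range_zero, List.foldl_nil]
      rw [PySem.Dict.get?_insert]
      have h0 : pfx temp 0 = 0 := by simp [pfx]
      simp only [maxPre, h0]
      by_cases hv : v = (0 : Int)
      · subst hv
        simp
      · rw [if_neg hv, if_neg (fun h => hv h.symm)]
        simp [PySem.Dict.get?_empty]
    · simp only [List.range_zero, List.foldl_nil]
      exact ⟨Or.inl ⟨rfl, fun k j h => absurd h.2 (Nat.not_lt_zero j)⟩,
        iff_of_true rfl (fun k j h => absurd h.2 (Nat.not_lt_zero j))⟩
  | succ n ih =>
    intro h
    have hn : n < temp.length := Nat.lt_of_succ_le h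
    obtain ⟨ih1, ih2, ih3⟩ := ih (Nat.le_of_lt hn)
    simp only [List.range_succ, List.foldl_append, List.foldl_cons, List.foldl_nil]
    set st := (List.range n).foldl (fun st (k : Nat) => stepA temp total st (k : Int))
      (PySem.Dict.empty.insert 0 (-1), none, 0) with hst
    simp only [stepA, PySem.List.pyGetD_natCast, ih1]
    have hP : pfx temp n + temp.getD n 0 = pfx temp (n+1) := (pfx_succ temp hn).symm
    rw [hP]
    refine ⟨rfl, ?_, ?_⟩
    · intro v
      rw [PySem.Dict.get?_insert, ih2 v]
      simp only [maxPre]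
      by_cases hv : v = pfx temp (n+1)
      · subst hv
        rw [if_pos rfl, if_pos rfl]
        simp only [Option.map_some, Option.some.injEq]
        push_cast
        ring
      · rw [if_neg hv, if_neg (fun h => hv h.symm)]
    · rw [ih2 (pfx temp (n+1) - total)]
      cases hmp : maxPre temp n (pfx temp (n+1) - total) with
      | none =>
        simp only [Option.map_none]
        refine AInv_congr ?_ ih3
        intro k j
        constructor
        · rintro ⟨hv, hj⟩
          exact ⟨hv, Nat.lt_succ_of_lt hj⟩
        · rintro ⟨hv, hj⟩
          rcases Nat.lt_succ_iff_lt_or_eq.mp hj with hj' | rfl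
          · exact ⟨hv, hj'⟩
          · exfalso
            have h1 := maxPre_none temp hmp k hv.1
            have h2 := hv.2.2
            omega
      | some kmax =>
        simp only [Option.map_some]
        obtain ⟨hk_le, hk_pfx⟩ := maxPre_some temp hmp
        have hmaxf := maxPre_max temp hmp
        have hexp : ∀ x : Int, x - ((kmax : Int) - 1) = x - (kmax : Int) + 1 := by
          intro x; ring
        rw [hexp]
        have hiffQ : ∀ k j, ((ValidP temp total k j ∧ j < n) ∨
            ((k ≤ n ∧ pfx temp k = pfx temp (n+1) - total) ∧ j = n)) ↔
            (ValidP temp total k j ∧ j < n + 1) := by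
          intro k j
          constructor
          · rintro (⟨hv, hj⟩ | ⟨⟨hkn, hpk⟩, rfl⟩)
            · exact ⟨hv, Nat.lt_succ_of_lt hj⟩
            · exact ⟨⟨hkn, hn, by omega⟩, by omega⟩
          · rintro ⟨hv, hj⟩
            rcases Nat.lt_succ_iff_lt_or_eq.mp hj with hj' | rfl
            · exact Or.inl ⟨hv, hj'⟩
            · exact Or.inr ⟨⟨hv.1, by have := hv.2.2; omega⟩, rfl⟩
        cases ho : st.2.1 with
        | none =>
          rw [ho] at ih3
          exact AInv_congr hiffQ
            (AInv_extend (Q := fun k j => ValidP temp total k j ∧ j < n) (o := none)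
              (R := fun k => k ≤ n ∧ pfx temp k = pfx temp (n+1) - total)
              (j0 := n) (kmax := kmax) ⟨hk_le, hk_pfx⟩
              (fun k hk => hmaxf k hk.1 hk.2) (fun k hk => hk.1) ih3)
        | some l =>
          rw [ho] at ih3
          exact AInv_congr hiffQ
            (AInv_extend (Q := fun k j => ValidP temp total k j ∧ j < n) (o := some l)
              (R := fun k => k ≤ n ∧ pfx temp k = pfx temp (n+1) - total)
              (j0 := n) (kmax := kmax) ⟨hk_le, hk_pfx⟩
              (fun k hk => hmaxf k hk.1 hk.2) (fun k hk => hk.1) ih3)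

lemma B_inner (temp : List Int) (total : Int) (m : Nat) (hm : m < temp.length) :
    ∀ (t a : Nat), a ≤ temp.length → temp.length - a = t → m ≤ a → ∀ best : Int,
    MinOf (fun k j => ValidP temp total k j ∧ (k < m ∨ (k = m ∧ j < a))) best →
    MinOf (fun k j => ValidP temp total k j ∧ (k < m ∨ k = m))
      (((PySem.List.pyRange (a : Int) ((temp.length : Nat) : Int) 1).foldl
          (stepBIn temp total (m : Int)) (best, pfx temp a - pfx temp m)).1) := by
  intro t
  induction t with
  | zero =>
    intro a ha hta hma best hb
    have haa : a = temp.length := by omega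
    subst haa
    rw [PySem.List.pyRange_one_eq_nil (le_refl _)]
    simp only [List.foldl_nil]
    refine MinOf_congr ?_ hb
    intro k j
    constructor
    · rintro ⟨hv, hk | ⟨hk, _⟩⟩
      · exact ⟨hv, Or.inl hk⟩
      · exact ⟨hv, Or.inr hk⟩
    · rintro ⟨hv, hk | hk⟩
      · exact ⟨hv, Or.inl hk⟩
      · exact ⟨hv, Or.inr ⟨hk, hv.2.1⟩⟩
  | succ t ih =>
    intro a ha hta hma best hb
    have haln : a < temp.length := by omega
    rw [PySem.List.pyRange_one_cons (by exact_mod_cast haln)]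
    simp only [List.foldl_cons, stepBIn, PySem.List.pyGetD_natCast]
    have hsum : pfx temp a - pfx temp m + temp.getD a 0
        = pfx temp (a+1) - pfx temp m := by
      have := pfx_succ temp haln
      omega
    rw [hsum]
    have hcast : ((a : Int) + 1) = (((a + 1 : Nat) : Nat) : Int) := by push_cast; ring
    rw [hcast]
    have hQold : ∀ k j, (ValidP temp total k j ∧ (k < m ∨ (k = m ∧ j < a))) → k ≤ j :=
      fun k j hq => hq.1.1
    by_cases hcond : pfx temp (a+1) - pfx temp m = total
    · have hval : ValidP temp total m a := ⟨hma, haln, by omega⟩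
      have hb' := MinOf_add m a hQold hma hb
      have hb2 : MinOf (fun k j => ValidP temp total k j ∧ (k < m ∨ (k = m ∧ j < a + 1)))
          (if best = -1 ∨ (a : Int) - (m : Int) + 1 < best
            then (a : Int) - (m : Int) + 1 else best) := by
        refine MinOf_congr ?_ hb'
        intro k j
        constructor
        · rintro (⟨hv, hk⟩ | ⟨rfl, rfl⟩)
          · rcases hk with hk | ⟨hk, hj⟩
            · exact ⟨hv, Or.inl hk⟩
            · exact ⟨hv, Or.inr ⟨hk, by omega⟩⟩
          · exact ⟨hval, Or.inr ⟨rfl, by omega⟩⟩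
        · rintro ⟨hv, hk | ⟨rfl, hj⟩⟩
          · exact Or.inl ⟨hv, Or.inl hk⟩
          · rcases Nat.lt_succ_iff_lt_or_eq.mp hj with hj' | rfl
            · exact Or.inl ⟨hv, Or.inr ⟨rfl, hj'⟩⟩
            · exact Or.inr ⟨rfl, rfl⟩
      by_cases hY : best = -1 ∨ (a : Int) - (m : Int) + 1 < best
      · rw [if_pos ⟨hcond, hY⟩]
        rw [if_pos hY] at hb2
        exact ih (a+1) (by omega) (by omega) (by omega) _ hb2
      · rw [if_neg (fun hc => hY hc.2)]
        rw [if_neg hY] at hb2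
        exact ih (a+1) (by omega) (by omega) (by omega) _ hb2
    · rw [if_neg (fun hc => hcond hc.1)]
      refine ih (a+1) (by omega) (by omega) (by omega) _ (MinOf_congr ?_ hb)
      intro k j
      constructor
      · rintro ⟨hv, hk | ⟨hk, hj⟩⟩
        · exact ⟨hv, Or.inl hk⟩
        · exact ⟨hv, Or.inr ⟨hk, by omega⟩⟩
      · rintro ⟨hv, hk | ⟨rfl, hj⟩⟩
        · exact ⟨hv, Or.inl hk⟩
        · rcases Nat.lt_succ_iff_lt_or_eq.mp hj with hj' | rfl
          · exact ⟨hv, Or.inr ⟨rfl, hj'⟩⟩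
          · exact absurd hv.2.2 (by omega)

lemma B_outer (temp : List Int) (total : Int) :
    ∀ m, m ≤ temp.length →
    MinOf (fun k j => ValidP temp total k j ∧ k < m)
      ((List.range m).foldl
        (fun best (k : Nat) =>
          ((PySem.List.pyRange (k : Int) ((temp.length : Nat) : Int) 1).foldl
            (stepBIn temp total (k : Int)) (best, 0)).1)
        (-1)) := by
  intro m
  induction m with
  | zero =>
    intro _
    simp only [List.range_zero, List.foldl_nil]
    exact Or.inl ⟨rfl, fun k j h => absurd h.2 (Nat.not_lt_zero k)⟩
  | succ n ih =>
    intro h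
    have hn : n < temp.length := Nat.lt_of_succ_le h
    simp only [List.range_succ, List.foldl_append, List.foldl_cons, List.foldl_nil]
    have hb0 : MinOf (fun k j => ValidP temp total k j ∧ (k < n ∨ (k = n ∧ j < n)))
        ((List.range n).foldl
          (fun best (k : Nat) =>
            ((PySem.List.pyRange (k : Int) ((temp.length : Nat) : Int) 1).foldl
              (stepBIn temp total (k : Int)) (best, 0)).1)
          (-1)) := by
      refine MinOf_congr ?_ (ih (Nat.le_of_lt hn))
      intro k j
      constructor
      · rintro ⟨hv, hk⟩
        exact ⟨hv, Or.inl hk⟩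
      · rintro ⟨hv, hk | ⟨rfl, hj⟩⟩
        · exact ⟨hv, hk⟩
        · exact absurd hv.1 (by omega)
    have := B_inner temp total n hn (temp.length - n) n (by omega) rfl (le_refl n) _ hb0
    rw [sub_self] at this
    refine MinOf_congr ?_ this
    intro k j
    constructor
    · rintro ⟨hv, hk | rfl⟩
      · exact ⟨hv, by omega⟩
      · exact ⟨hv, by omega⟩
    · rintro ⟨hv, hk⟩
      rcases Nat.lt_succ_iff_lt_or_eq.mp hk with hk' | rfl
      · exact ⟨hv, Or.inl hk'⟩
      · exact ⟨hv, Or.inr rfl⟩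

lemma core (total : Int) (nums : List Int) :
    findMinSubarrayA total nums = shortestB total nums := by
  simp only [findMinSubarrayA, shortestB, PySem.List.len_eq,
    PySem.List.pyRange_zero_natCast, List.foldl_map]
  rw [finishA_eq]
  have hA := (A_loop (nums ++ nums) total (nums ++ nums).length (le_refl _)).2.2
  have hB := B_outer (nums ++ nums) total (nums ++ nums).length (le_refl _)
  have hA2 : MinOf (ValidP (nums ++ nums) total)
      ((((List.range (nums ++ nums).length).foldl
          (fun st (k : Nat) => stepA (nums ++ nums) total st (k : Int))
          (PySem.Dict.empty.insert 0 (-1), none, 0)).2.1).getD (-1)) := by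
    refine MinOf_congr ?_ hA.1
    intro k j
    exact ⟨fun h => h.1, fun h => ⟨h, h.2.1⟩⟩
  have hB2 : MinOf (ValidP (nums ++ nums) total)
      ((List.range (nums ++ nums).length).foldl
        (fun best (k : Nat) =>
          ((PySem.List.pyRange (k : Int) (((nums ++ nums).length : Nat) : Int) 1).foldl
            (stepBIn (nums ++ nums) total (k : Int)) (best, 0)).1)
        (-1)) := by
    refine MinOf_congr ?_ hB
    intro k j
    exact ⟨fun h => h.1, fun h => ⟨h, lt_of_le_of_lt h.1 h.2.1⟩⟩
  exact MinOf_uniq hA2 hB2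

-- ===== VERDICT (by name: the statement is the Claim_ definition above) =====
theorem minSizeSubarray_spec : Claim_equal_minSizeSubarray := by
  intro nums target _ _
  show minSizeSubarray nums target = minSizeSubarray_alt nums target
  simp only [minSizeSubarray, minSizeSubarray_alt, core]
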